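-- pv_equiv track=rewrite | github.com/annieLognCoding/PythonTetrisClass | Lectures/basicPython.py | func_foo
-- ===== SOURCE A (Python) =====
-- def func_foo(s):
--     length = len(s)
--     result = ""
--     for i in range(length):
--         if s[i] == s[length - 1 - i]:
--             result += s[i]
--         else:
--             break
--     return result
-- ===== SOURCE B (Python) =====
-- def func_foo(s):
--     rev = s[::-1]
--     k = len(s)
--     for i, (a, b) in enumerate(zip(s, rev)):
--         if a != b:
--             k = i
--             break
--     return s[:k]
-- ===== Notes on version B (the rewrite author's own statement) =====
-- stated objective: alternative
-- what changed: B precomputes the reversed string, locates the first mismatch index by scanning zipped pairs (defaulting to len(s)), and returns a single slice, instead of indexing both ends while concatenating characters one by one.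
import Mathlib
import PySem

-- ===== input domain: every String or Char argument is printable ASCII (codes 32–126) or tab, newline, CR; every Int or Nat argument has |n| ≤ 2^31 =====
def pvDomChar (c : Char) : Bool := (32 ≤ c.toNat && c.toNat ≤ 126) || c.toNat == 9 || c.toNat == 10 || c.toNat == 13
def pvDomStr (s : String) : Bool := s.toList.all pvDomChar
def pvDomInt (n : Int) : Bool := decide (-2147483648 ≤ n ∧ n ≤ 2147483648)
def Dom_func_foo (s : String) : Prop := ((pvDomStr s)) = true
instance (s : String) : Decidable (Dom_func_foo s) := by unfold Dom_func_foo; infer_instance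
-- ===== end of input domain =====

-- B finds the first index where s and its reversal differ and returns one slice,
-- instead of A's two-ended indexing loop with character-by-character concatenation (alternative decomposition).

-- ===== PORT A =====
-- A's loop: for i in range(length): if s[i] == s[length-1-i]: result += s[i] else: break
-- (accumulator kept as List Char, turned into a String at the end)
def fooLoopA (cs : List Char) (n : Nat) (i : Nat) (acc : List Char) : List Char :=
  if _h : i < n then
    if cs.getD i ' ' == cs.getD (n - 1 - i) ' ' then
      fooLoopA cs n (i + 1) (acc ++ [cs.getD i ' '])
    else acc
  else acc
termination_by n - i

def func_foo (s : String) : String :=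
  String.mk (fooLoopA s.toList s.toList.length 0 [])

-- ===== PORT B =====
-- B's loop: for i, (a, b) in enumerate(zip(s, rev)): if a != b: k = i; break
def fooKLoop (pairs : List (Char × Char)) (i : Nat) (k : Nat) : Nat :=
  match pairs with
  | [] => k
  | (a, b) :: t => if a ≠ b then i else fooKLoop t (i + 1) k

def func_foo_alt (s : String) : String :=
  let cs := s.toList
  let rev := cs.reverse
  let k := fooKLoop (cs.zip rev) 0 cs.length
  String.mk (cs.take k)

-- ===== PRECONDITION & SPEC =====
def Spec_func_foo (s : String) (out : String) : Prop := out = func_foo_alt s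
instance (s : String) (out : String) : Decidable (Spec_func_foo s out) := by unfold Spec_func_foo; infer_instance

-- ===== CLAIM (what is proved, stated in full; the proofs are below) =====
def Claim_equal_func_foo : Prop := ∀ (s : String), Dom_func_foo s → Spec_func_foo s (func_foo s)

-- ===== LEMMAS AND PROOFS =====

-- take-while-equal over the zipped pairs: the common value both ports compute
def pvTkw : List (Char × Char) → List Char
  | [] => []
  | (a, b) :: t => if a == b then a :: pvTkw t else []

-- first mismatch index, if any
def pvM : List (Char × Char) → Option Nat
  | [] => none
  | (a, b) :: t => if a ≠ b then some 0 else (pvM t).map (· + 1)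

lemma pv_kLoop_eq (l : List (Char × Char)) (i k : Nat) :
    fooKLoop l i k = match pvM l with | some j => i + j | none => k := by
  induction l generalizing i with
  | nil => simp [fooKLoop, pvM]
  | cons p t ih =>
    obtain ⟨a, b⟩ := p
    by_cases hab : a = b
    · subst hab
      rw [fooKLoop, if_neg (by simp), ih]
      have hm : pvM ((a, a) :: t) = (pvM t).map (· + 1) := by simp [pvM]
      rw [hm]
      cases h : pvM t
      · simp
      · simp
        ring
    · rw [fooKLoop, if_pos hab]
      simp [pvM, hab]

lemma pv_tkw_take (l : List (Char × Char)) :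
    pvTkw l = (l.map Prod.fst).take ((pvM l).getD l.length) := by
  induction l with
  | nil => simp [pvTkw, pvM]
  | cons p t ih =>
    obtain ⟨a, b⟩ := p
    by_cases hab : a = b
    · subst hab
      rw [pvTkw, if_pos (by simp)]
      have hm : pvM ((a, a) :: t) = (pvM t).map (· + 1) := by simp [pvM]
      rw [hm, ih]
      cases h : pvM t <;> simp [List.take_succ_cons]
    · rw [pvTkw, if_neg (by simp [hab])]
      simp [pvM, hab]

lemma pv_loopA_eq (cs : List Char) (i : Nat) (acc : List Char) :
    fooLoopA cs cs.length i acc = acc ++ pvTkw ((cs.zip cs.reverse).drop i) := by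
  generalize hfuel : cs.length - i = fuel
  induction fuel generalizing i acc with
  | zero =>
    have hi : cs.length ≤ i := by omega
    have hz : (cs.zip cs.reverse).length = cs.length := by simp
    rw [fooLoopA, dif_neg (by omega), List.drop_of_length_le (by omega)]
    simp [pvTkw]
  | succ m ih =>
    have hi : i < cs.length := by omega
    have hz : (cs.zip cs.reverse).length = cs.length := by simp
    have hdrop : (cs.zip cs.reverse).drop i =
        (cs.zip cs.reverse)[i] :: (cs.zip cs.reverse).drop (i + 1) :=
      List.drop_eq_getElem_cons (by omega)
    have hrevlen : i < cs.reverse.length := by simpa using hi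
    have hget : (cs.zip cs.reverse)[i]'(by omega) =
        (cs[i], cs[cs.length - 1 - i]'(by omega)) := by
      rw [List.getElem_zip]
      congr 1
      rw [List.getElem_reverse]
    have h1 : cs.getD i ' ' = cs[i] := List.getD_eq_getElem cs ' ' hi
    have h2 : cs.getD (cs.length - 1 - i) ' ' = cs[cs.length - 1 - i]'(by omega) :=
      List.getD_eq_getElem cs ' ' (by omega)
    rw [fooLoopA, dif_pos hi, hdrop, hget, h1, h2]
    by_cases hab : cs[i] = cs[cs.length - 1 - i]'(by omega)
    · rw [if_pos (by simpa using hab)]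
      rw [ih (i + 1) _ (by omega)]
      simp [pvTkw, hab]
    · rw [if_neg (by simpa using hab)]
      simp [pvTkw, hab]

lemma pv_main (s : String) : func_foo s = func_foo_alt s := by
  unfold func_foo func_foo_alt
  set cs := s.toList with hcs
  rw [pv_loopA_eq cs 0 []]
  simp only [List.drop_zero, List.nil_append]
  rw [pv_kLoop_eq, pv_tkw_take]
  have hmap : (cs.zip cs.reverse).map Prod.fst = cs :=
    List.map_fst_zip (by simp)
  have hlen : (cs.zip cs.reverse).length = cs.length := by simp
  rw [hmap, hlen]
  cases h : pvM (cs.zip cs.reverse) <;> simp [h]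

-- ===== VERDICT (by name: the statement is the Claim_ definition above) =====
theorem func_foo_spec : Claim_equal_func_foo := by
  intro s _
  unfold Spec_func_foo
  exact pv_main s
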